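-- pv_equiv track=rewrite | github.com/tomasbrogueira/Work | IST/fp/proj_tiago/part0_9fixo.py | cleantransformada
-- ===== SOURCE A (Python) =====
-- def cleantransformada(points, f):
--     minvalue=8
--     i=0
--     while i<len(f):
--         if f[i]<minvalue:
--             f.pop(i)
--             points.pop(i)
--         else:
--             i=i+1
--     return [points, f]
-- ===== SOURCE B (Python) =====
-- def cleantransformada(points, f):
--     # delete, in place, every position whose f value is below the threshold
--     bad = {i for i, y in enumerate(f) if y < 8}
--     points[:] = [x for i, x in enumerate(points) if i not in bad]
--     f[:] = [y for i, y in enumerate(f) if i not in bad]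
--     return [points, f]
-- ===== Notes on version B (the rewrite author's own statement) =====
-- stated objective: faster
-- what changed: Replaces the pop(i)-in-a-while-loop deletion (each pop shifts the whole tail) by computing the set of positions with f below 8 once and rebuilding both lists in place with a single filter each; Pre_ excludes only inputs where A raises IndexError (a below-threshold position beyond len(points)).
import Mathlib
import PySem

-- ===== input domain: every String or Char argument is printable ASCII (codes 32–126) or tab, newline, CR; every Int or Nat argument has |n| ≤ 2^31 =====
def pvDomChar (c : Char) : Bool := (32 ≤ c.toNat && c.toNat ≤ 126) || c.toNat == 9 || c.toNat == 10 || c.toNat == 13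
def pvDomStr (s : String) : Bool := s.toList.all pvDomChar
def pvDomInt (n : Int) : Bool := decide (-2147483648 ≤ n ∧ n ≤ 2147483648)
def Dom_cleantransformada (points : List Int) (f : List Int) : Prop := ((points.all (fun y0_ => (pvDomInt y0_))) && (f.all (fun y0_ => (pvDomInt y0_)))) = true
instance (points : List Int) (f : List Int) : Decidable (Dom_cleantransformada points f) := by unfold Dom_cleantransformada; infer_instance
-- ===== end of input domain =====

-- B replaces A's quadratic pop(i)-while-loop by a one-shot set of bad positions plus one
-- filter pass per list (O(n)); equivalence is about the RETURN value (in Python both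
-- mutate the argument lists in place).

-- ===== PORT A =====
-- the while loop: state (points, f, i); pop? none = IndexError, excluded by Pre_
def cleantransformadaLoop (points : List Int) (f : List Int) (i : Nat) : List (List Int) :=
  if h : i < f.length then
    if f[i] < 8 then
      match hfp : PySem.List.pop? f (i : Int), hpp : PySem.List.pop? points (i : Int) with
      | some (_, f'), some (_, p') => cleantransformadaLoop p' f' i
      | _, _ => []  -- IndexError (outside Pre_)
    else
      cleantransformadaLoop points f (i + 1)
  else
    [points, f]
termination_by f.length - i
decreasing_by
  · have h2 : f'.length + 1 = f.length := PySem.List.length_of_pop?_eq_some f hfp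
    omega
  · omega

def cleantransformada (points : List Int) (f : List Int) : List (List Int) :=
  cleantransformadaLoop points f 0

-- ===== PORT B =====
-- bad = {i for i, y in enumerate(f) if y < 8}
def badSet (f : List Int) : PySem.Set Int :=
  PySem.Set.ofList (((PySem.List.enumerate f).filter (fun p => decide (p.2 < 8))).map (·.1))

def cleantransformada_alt (points : List Int) (f : List Int) : List (List Int) :=
  [((PySem.List.enumerate points).filter
      (fun p => !(PySem.Set.contains (badSet f) p.1))).map (·.2),
   ((PySem.List.enumerate f).filter
      (fun p => !(PySem.Set.contains (badSet f) p.1))).map (·.2)]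

-- ===== PRECONDITION & SPEC =====
-- Pre_ is exactly the inputs on which A returns: A raises IndexError (points.pop(j) with
-- j out of range) exactly when some j < len(f) has f[j] < 8 and j >= len(points).
def Pre_cleantransformada (points : List Int) (f : List Int) : Prop :=
  ∀ j < f.length, f.getD j 0 < 8 → j < points.length
instance (points : List Int) (f : List Int) : Decidable (Pre_cleantransformada points f) := by
  unfold Pre_cleantransformada; infer_instance

def pvWitness_cleantransformada : List Int × List Int := ([1, 2, 3], [10, 3, 9])

def Spec_cleantransformada (points : List Int) (f : List Int) (out : List (List Int)) : Prop :=
  out = cleantransformada_alt points f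
instance (points : List Int) (f : List Int) (out : List (List Int)) : Decidable (Spec_cleantransformada points f out) := by
  unfold Spec_cleantransformada; infer_instance

-- ===== CLAIM (what is proved, stated in full; the proofs are below) =====
def Claim_equal_cleantransformada : Prop := ∀ (points : List Int) (f : List Int), Dom_cleantransformada points f → Pre_cleantransformada points f → Spec_cleantransformada points f (cleantransformada points f)

-- ===== LEMMAS AND PROOFS =====

-- common specification: surviving f values, and surviving points (parallel walk; points
-- beyond len(f) are kept)
def specF : List Int → List Int
  | [] => []
  | y :: f' => if y < 8 then specF f' else y :: specF f'

def specP : List Int → List Int → List Int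
  | [], _ => []
  | x :: p', [] => x :: specP p' []
  | x :: p', y :: f' => if y < 8 then specP p' f' else x :: specP p' f'

theorem specP_nil_right (p : List Int) : specP p [] = p := by
  induction p with
  | nil => rfl
  | cons x p' ih => simp [specP, ih]

theorem specP_drop_cons (p f : List Int) (i : Nat) (hp : i < p.length) (hf : i < f.length) :
    specP (p.drop i) (f.drop i) =
      if f[i] < 8 then specP (p.drop (i+1)) (f.drop (i+1))
      else p[i] :: specP (p.drop (i+1)) (f.drop (i+1)) := by
  rw [List.drop_eq_getElem_cons hp, List.drop_eq_getElem_cons hf]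
  simp [specP]

theorem specF_drop_cons (f : List Int) (i : Nat) (hf : i < f.length) :
    specF (f.drop i) =
      if f[i] < 8 then specF (f.drop (i+1)) else f[i] :: specF (f.drop (i+1)) := by
  rw [List.drop_eq_getElem_cons hf]
  simp [specF]

-- A's loop, characterised under the no-IndexError hypothesis
theorem take_succ_getElem (l : List Int) (i : Nat) (h : i < l.length) :
    l.take (i+1) = l.take i ++ [l[i]] := by
  rw [List.take_add_one, List.getElem?_eq_getElem h]
  rfl

theorem cleantransformadaLoop_eq (points f : List Int) (i : Nat)
    (hpre : ∀ j, i ≤ j → (h : j < f.length) → f[j] < 8 → j < points.length) :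
    cleantransformadaLoop points f i =
      [points.take i ++ specP (points.drop i) (f.drop i),
       f.take i ++ specF (f.drop i)] := by
  rw [cleantransformadaLoop]
  by_cases h : i < f.length
  · rw [dif_pos h]
    by_cases hlt : f[i] < 8
    · have hip : i < points.length := hpre i le_rfl h hlt
      have hf' : PySem.List.pop? f (i : Int) = some (f[i], f.eraseIdx i) :=
        PySem.List.pop?_natCast f i h
      have hp' : PySem.List.pop? points (i : Int) = some (points[i], points.eraseIdx i) :=
        PySem.List.pop?_natCast points i hip
      rw [if_pos hlt, hf', hp']
      show cleantransformadaLoop (points.eraseIdx i) (f.eraseIdx i) i = _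
      rw [cleantransformadaLoop_eq (points.eraseIdx i) (f.eraseIdx i) i
        (by
          intro j hij hjlen hjval
          have hlen : (f.eraseIdx i).length = f.length - 1 := by
            rw [List.length_eraseIdx_of_lt h]
          have hje : (f.eraseIdx i)[j] = f[j+1]'(by omega) := by
            rw [List.getElem_eraseIdx_of_ge (by omega) hij]
          have := hpre (j+1) (by omega) (by omega) (by rw [← hje]; exact hjval)
          rw [List.length_eraseIdx_of_lt hip]
          omega)]
      have e1 : (points.eraseIdx i).take i = points.take i := by
        rw [List.eraseIdx_eq_take_drop_succ, List.take_append_of_le_length (by simp; omega)]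
        simp [List.take_take]
      have e2 : (f.eraseIdx i).take i = f.take i := by
        rw [List.eraseIdx_eq_take_drop_succ, List.take_append_of_le_length (by simp; omega)]
        simp [List.take_take]
      have e3 : (points.eraseIdx i).drop i = points.drop (i+1) := by
        rw [List.eraseIdx_eq_take_drop_succ,
          List.drop_append_of_le_length (by simp [Nat.le_of_lt hip])]
        simp
      have e4 : (f.eraseIdx i).drop i = f.drop (i+1) := by
        rw [List.eraseIdx_eq_take_drop_succ,
          List.drop_append_of_le_length (by simp [Nat.le_of_lt h])]
        simp
      rw [e1, e2, e3, e4, specF_drop_cons f i h, if_pos hlt]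
      by_cases hip2 : i < points.length
      · rw [specP_drop_cons points f i hip2 h, if_pos hlt]
      · omega
    · rw [if_neg hlt]
      rw [cleantransformadaLoop_eq points f (i+1)
        (by intro j hij hjlen hjval; exact hpre j (by omega) hjlen hjval)]
      have ef : f.take (i+1) ++ specF (f.drop (i+1)) = f.take i ++ specF (f.drop i) := by
        rw [specF_drop_cons f i h, if_neg hlt, take_succ_getElem f i h]
        simp only [List.append_assoc, List.cons_append, List.nil_append]
      by_cases hip : i < points.length
      · have ep : points.take (i+1) ++ specP (points.drop (i+1)) (f.drop (i+1)) =
            points.take i ++ specP (points.drop i) (f.drop i) := by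
          rw [specP_drop_cons points f i hip h, if_neg hlt, take_succ_getElem points i hip]
          simp only [List.append_assoc, List.cons_append, List.nil_append]
        rw [ef, ep]
      · have hple : points.length ≤ i := by omega
        have e1 : points.take (i+1) = points := List.take_of_length_le (by omega)
        have e2 : points.take i = points := List.take_of_length_le hple
        have e3 : points.drop (i+1) = [] := List.drop_eq_nil_of_le (by omega)
        have e4 : points.drop i = [] := List.drop_eq_nil_of_le hple
        rw [ef, e1, e2, e3, e4]
        simp [specP]
  · rw [dif_neg h]
    have hle : f.length ≤ i := by omega
    rw [List.drop_eq_nil_of_le hle, List.take_of_length_le hle, specP_nil_right]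
    by_cases hp : points.length ≤ i
    · rw [List.take_of_length_le hp, List.drop_eq_nil_of_le hp]; simp [specF]
    · rw [List.take_append_drop]; simp [specF]
termination_by f.length - i
decreasing_by
  · have : (f.eraseIdx i).length = f.length - 1 := List.length_eraseIdx_of_lt h
    omega
  · omega

-- B side: membership in the bad-index set
theorem badSet_mem (f : List Int) (i : Int) :
    i ∈ badSet f ↔ ∃ (k : Nat) (h : k < f.length), i = (k : Int) ∧ f[k] < 8 := by
  unfold badSet
  rw [PySem.Set.mem_ofList]
  constructor
  · intro hi
    rcases List.mem_map.1 hi with ⟨p, hp, hpi⟩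
    rcases List.mem_filter.1 hp with ⟨hpe, hplt⟩
    rcases (PySem.List.mem_enumerate_iff _ _ _).1 hpe with ⟨k, hk, hpk⟩
    refine ⟨k, hk, ?_, ?_⟩
    · rw [← hpi, hpk]; simp
    · have : p.2 = f[k] := by rw [hpk]
      simpa [this] using hplt
  · rintro ⟨k, hk, rfl, hlt⟩
    refine List.mem_map.2 ⟨((k : Int), f[k]), ?_, rfl⟩
    refine List.mem_filter.2 ⟨?_, by simpa using hlt⟩
    exact (PySem.List.mem_enumerate_iff _ _ _).2 ⟨k, hk, by simp⟩

theorem badSet_contains_lt (f : List Int) (k : Nat) (hk : k < f.length) :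
    PySem.Set.contains (badSet f) ((k : Nat) : Int) = decide (f[k] < 8) := by
  by_cases h : f[k] < 8
  · rw [decide_eq_true h]
    exact (PySem.Set.contains_iff _ _).2 ((badSet_mem f k).2 ⟨k, hk, rfl, h⟩)
  · rw [decide_eq_false h]
    cases hb : PySem.Set.contains (badSet f) ((k : Nat) : Int) with
    | false => rfl
    | true =>
      exfalso
      rcases (badSet_mem f (k : Int)).1 ((PySem.Set.contains_iff _ _).1 hb) with
        ⟨k', hk', hkk, hlt⟩
      have : k = k' := by exact_mod_cast hkk
      subst this
      exact h hlt

theorem badSet_contains_ge (f : List Int) (k : Nat) (hk : f.length ≤ k) :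
    PySem.Set.contains (badSet f) ((k : Nat) : Int) = false := by
  cases hb : PySem.Set.contains (badSet f) ((k : Nat) : Int) with
  | false => rfl
  | true =>
    exfalso
    rcases (badSet_mem f (k : Int)).1 ((PySem.Set.contains_iff _ _).1 hb) with
      ⟨k', hk', hkk, _⟩
    have : k = k' := by exact_mod_cast hkk
    omega

-- B's f-side filter equals specF
theorem filter_enum_specF (f : List Int) (s : Int) (B : Int → Bool)
    (h : ∀ (k : Nat), (hk : k < f.length) → B (s + k) = decide (f[k] < 8)) :
    ((PySem.List.enumerate f s).filter (fun p => !(B p.1))).map (·.2) = specF f := by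
  induction f generalizing s with
  | nil => simp [PySem.List.enumerate_nil, specF]
  | cons y f' ih =>
    rw [PySem.List.enumerate_cons]
    have h0 : B s = decide (y < 8) := by simpa using h 0 (by simp)
    have ih' := ih (s + 1) (by
      intro k hk
      have := h (k + 1) (by simpa using Nat.succ_lt_succ hk)
      simpa [add_assoc, add_comm, add_left_comm] using this)
    by_cases hy : y < 8
    · rw [show specF (y :: f') = specF f' from by simp [specF, hy]]
      rw [← ih']
      simp [List.filter, h0, hy]
    · rw [show specF (y :: f') = y :: specF f' from by simp [specF, hy]]
      rw [← ih']
      simp [List.filter, h0, hy]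

-- B's points-side filter equals specP
theorem filter_enum_specP (ps : List Int) (fs : List Int) (s : Int) (B : Int → Bool)
    (h1 : ∀ (k : Nat), (hk : k < fs.length) → B (s + k) = decide (fs[k] < 8))
    (h2 : ∀ (k : Nat), fs.length ≤ k → B (s + k) = false) :
    ((PySem.List.enumerate ps s).filter (fun p => !(B p.1))).map (·.2) = specP ps fs := by
  induction ps generalizing fs s with
  | nil => simp [PySem.List.enumerate_nil, specP]
  | cons x ps' ih =>
    rw [PySem.List.enumerate_cons]
    cases fs with
    | nil =>
      have h0 : B s = false := by simpa using h2 0 (by simp)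
      have ih' := ih [] (s + 1)
        (by intro k hk; simp at hk)
        (by
          intro k _
          have := h2 (k + 1) (by simp)
          simpa [add_assoc, add_comm, add_left_comm] using this)
      rw [show specP (x :: ps') [] = x :: specP ps' [] from rfl, ← ih']
      simp [List.filter, h0]
    | cons y fs' =>
      have h0 : B s = decide (y < 8) := by simpa using h1 0 (by simp)
      have ih' := ih fs' (s + 1)
        (by
          intro k hk
          have := h1 (k + 1) (by simpa using Nat.succ_lt_succ hk)
          simpa [add_assoc, add_comm, add_left_comm] using this)
        (by
          intro k hk
          have := h2 (k + 1) (by simpa using Nat.succ_le_succ hk)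
          simpa [add_assoc, add_comm, add_left_comm] using this)
      by_cases hy : y < 8
      · rw [show specP (x :: ps') (y :: fs') = specP ps' fs' from by simp [specP, hy], ← ih']
        simp [List.filter, h0, hy]
      · rw [show specP (x :: ps') (y :: fs') = x :: specP ps' fs' from by simp [specP, hy],
          ← ih']
        simp [List.filter, h0, hy]

theorem cleantransformada_alt_eq (points f : List Int) :
    cleantransformada_alt points f = [specP points f, specF f] := by
  unfold cleantransformada_alt
  have hf := filter_enum_specF f 0 (fun i => PySem.Set.contains (badSet f) i)
    (by intro k hk; simpa using badSet_contains_lt f k hk)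
  have hp := filter_enum_specP points f 0 (fun i => PySem.Set.contains (badSet f) i)
    (by intro k hk; simpa using badSet_contains_lt f k hk)
    (by intro k hk; simpa using badSet_contains_ge f k hk)
  simp only at hf hp
  rw [hf, hp]

-- ===== VERDICT (by name: the statement is the Claim_ definition above) =====
theorem cleantransformada_spec : Claim_equal_cleantransformada := by
  intro points f _hdom hpre
  unfold Spec_cleantransformada cleantransformada
  rw [cleantransformada_alt_eq,
    cleantransformadaLoop_eq points f 0
      (by
        intro j _ hj hjv
        have := hpre j hj
        rw [List.getD_eq_getElem f 0 hj] at this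
        exact this hjv)]
  simp
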